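-- pv_equiv track=rewrite | github.com/asheuh/pyalgorithms | codeforces/max_k.py | solve_sequence_pair_weight
-- ===== SOURCE A (Python) =====
-- def solve_sequence_pair_weight(n, arr):
--     maps = {}
--     ans = 0
--
--     for i in range(n):
--         if arr[i] in maps:
--             ans += maps[arr[i]] * (n - i)
--         else:
--             maps[arr[i]] = 0
--
--         maps[arr[i]] += i + 1
--
--     return ans
-- ===== SOURCE B (Python) =====
-- def solve_sequence_pair_weight(n, arr):
--     # Group the indices by value first, then do one prefix pass per group.
--     groups = {}
--     for i in range(n):
--         groups.setdefault(arr[i], []).append(i)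
--     ans = 0
--     for idxs in groups.values():
--         prefix = 0
--         for i in idxs:
--             ans += prefix * (n - i)
--             prefix += i + 1
--     return ans
-- ===== Notes on version B (the rewrite author's own statement) =====
-- stated objective: alternative
-- what changed: A interleaves dict-of-prefix-sums updates with the answer accumulation in one branching pass; B first groups indices by value into lists, then runs a separate branch-free prefix-sum pass over each group's index list.
import Mathlib
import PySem

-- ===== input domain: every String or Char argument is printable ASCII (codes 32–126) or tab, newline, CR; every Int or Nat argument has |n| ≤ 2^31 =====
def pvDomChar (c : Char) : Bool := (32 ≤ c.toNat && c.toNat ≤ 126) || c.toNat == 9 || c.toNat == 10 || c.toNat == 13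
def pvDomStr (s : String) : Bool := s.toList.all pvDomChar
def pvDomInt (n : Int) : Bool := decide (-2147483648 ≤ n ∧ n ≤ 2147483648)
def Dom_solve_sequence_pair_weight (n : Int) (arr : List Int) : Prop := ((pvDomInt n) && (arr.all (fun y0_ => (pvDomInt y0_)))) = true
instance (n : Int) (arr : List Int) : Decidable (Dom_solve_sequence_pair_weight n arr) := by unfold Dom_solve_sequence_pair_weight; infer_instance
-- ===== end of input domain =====

-- B groups indices by value first, then accumulates each group with a separate prefix pass;
-- objective: alternative decomposition of the same O(n) computation (no speed claim).


-- ===== PORT A =====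
-- literal transliteration of A: one pass over range(n), a dict of running (p+1)-prefix-sums per
-- value, branching on membership; arr[i] is ported as (pyGet? arr i).getD 0 — Pre_ below keeps
-- every index in range, so the default is never taken on admitted inputs.
def solve_sequence_pair_weight (n : Int) (arr : List Int) : Int :=
  ((PySem.List.pyRange 0 n 1).foldl
    (fun (st : PySem.Dict Int Int × Int) (i : Int) =>
      let x := (PySem.List.pyGet? arr i).getD 0
      let st1 := if st.1.contains x then (st.1, st.2 + st.1.getD x 0 * (n - i))
                 else (st.1.insert x 0, st.2)
      (st1.1.insert x (st1.1.getD x 0 + (i + 1)), st1.2))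
    (PySem.Dict.empty, 0)).2

-- ===== PORT B =====
-- literal transliteration of B: grouping pass (setdefault(...,[]).append(i) = modify _ [] (· ++ [i])),
-- then a branch-free prefix pass per group over groups.values().
def solve_sequence_pair_weight_alt (n : Int) (arr : List Int) : Int :=
  let groups := (PySem.List.pyRange 0 n 1).foldl
    (fun (d : PySem.Dict Int (List Int)) (i : Int) =>
      d.modify ((PySem.List.pyGet? arr i).getD 0) [] (fun L => L ++ [i]))
    PySem.Dict.empty
  groups.values.foldl
    (fun (ans : Int) (L : List Int) =>
      (L.foldl (fun (st : Int × Int) (i : Int) => (st.1 + st.2 * (n - i), st.2 + i + 1)) (ans, 0)).1)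
    0

-- ===== PRECONDITION & SPEC =====
-- Pre_ excludes exactly the inputs where Python A raises IndexError: n > len(arr) (arr[i] for some i < n).
def Pre_solve_sequence_pair_weight (n : Int) (arr : List Int) : Prop := n ≤ (arr.length : Int)
instance (n : Int) (arr : List Int) : Decidable (Pre_solve_sequence_pair_weight n arr) := by
  unfold Pre_solve_sequence_pair_weight; infer_instance
def pvWitness_solve_sequence_pair_weight : Int × List Int := (3, [1, 1, 2])
def Spec_solve_sequence_pair_weight (n : Int) (arr : List Int) (out : Int) : Prop := out = solve_sequence_pair_weight_alt n arr
instance (n : Int) (arr : List Int) (out : Int) : Decidable (Spec_solve_sequence_pair_weight n arr out) := by unfold Spec_solve_sequence_pair_weight; infer_instance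

-- ===== CLAIM (what is proved, stated in full; the proofs are below) =====
def Claim_equal_solve_sequence_pair_weight : Prop := ∀ (n : Int) (arr : List Int), Dom_solve_sequence_pair_weight n arr → Pre_solve_sequence_pair_weight n arr → Spec_solve_sequence_pair_weight n arr (solve_sequence_pair_weight n arr)

-- ===== LEMMAS AND PROOFS =====

-- the inner prefix step of B, and the (contribution, prefix) pair of one group
def pvStep (n : Int) : Int × Int → Int → Int × Int :=
  fun st i => (st.1 + st.2 * (n - i), st.2 + i + 1)

def pvG (n : Int) (L : List Int) : Int × Int := L.foldl (pvStep n) (0, 0)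

-- A's fold step, with the key function abstracted
def pvStepA (n : Int) (f : Int → Int) : PySem.Dict Int Int × Int → Int → PySem.Dict Int Int × Int :=
  fun st i =>
    let x := f i
    let st1 := if st.1.contains x then (st.1, st.2 + st.1.getD x 0 * (n - i))
               else (st.1.insert x 0, st.2)
    (st1.1.insert x (st1.1.getD x 0 + (i + 1)), st1.2)

-- B's grouping step, with the key function abstracted
def pvStepG (f : Int → Int) : PySem.Dict Int (List Int) → Int → PySem.Dict Int (List Int) :=
  fun d i => d.modify (f i) [] (fun L => L ++ [i])

theorem pv_shift (n : Int) (L : List Int) (a b : Int) :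
    L.foldl (pvStep n) (a, b) = (a + (L.foldl (pvStep n) (0, b)).1, (L.foldl (pvStep n) (0, b)).2) := by
  induction L generalizing a b with
  | nil => simp
  | cons x L ih =>
    simp only [List.foldl_cons, pvStep]
    rw [ih, ih (0 + b * (n - x))]
    simp only [Prod.mk.injEq]
    exact ⟨by ring, by simp⟩

theorem pvG_append (n i : Int) (L : List Int) :
    pvG n (L ++ [i]) = ((pvG n L).1 + (pvG n L).2 * (n - i), (pvG n L).2 + i + 1) := by
  simp [pvG, List.foldl_append, pvStep]

theorem pv_evalList (n : Int) (vs : List (List Int)) (s : Int) :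
    vs.foldl (fun ans L => (L.foldl (pvStep n) (ans, 0)).1) s
      = s + (vs.map (fun L => (pvG n L).1)).sum := by
  induction vs generalizing s with
  | nil => simp
  | cons L vs ih =>
    simp only [List.foldl_cons, List.map_cons, List.sum_cons]
    rw [pv_shift, ih]
    unfold pvG
    ring

theorem pv_sum_map_update (keys : List Int) (F F' : Int → Int) (x : Int)
    (hnd : keys.Nodup) (hagree : ∀ k ∈ keys, k ≠ x → F k = F' k) :
    (keys.map F').sum = (keys.map F).sum + (if x ∈ keys then F' x - F x else 0) := by
  induction keys with
  | nil => simp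
  | cons k ks ih =>
    rcases List.nodup_cons.mp hnd with ⟨hk, hnd'⟩
    by_cases hkx : k = x
    · subst hkx
      have hxn : k ∉ ks := hk
      have hag : ∀ k' ∈ ks, k' ≠ k → F k' = F' k' := fun k' hk' _ => hagree k' (List.mem_cons_of_mem _ hk') (by rintro rfl; exact hxn hk')
      have hsum : (ks.map F').sum = (ks.map F).sum := by
        rw [ih hnd' hag]; simp [hxn]
      simp [hsum, hxn]
      ring
    · have hFk : F k = F' k := hagree k (List.mem_cons_self) hkx
      rw [List.map_cons, List.map_cons, List.sum_cons, List.sum_cons,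
        ih hnd' (fun k' hk' h => hagree k' (List.mem_cons_of_mem _ hk') h), hFk]
      by_cases hx : x ∈ ks
      · simp [hx, Ne.symm hkx]
        ring
      · simp [hx, Ne.symm hkx]

theorem pv_main (n : Int) (f : Int → Int) (l : List Int) :
    (l.foldl (pvStepG f) PySem.Dict.empty).keys.Nodup ∧
    (∀ v, (l.foldl (pvStepA n f) (PySem.Dict.empty, (0:Int))).1.contains v
        = (l.foldl (pvStepG f) PySem.Dict.empty).contains v) ∧
    (∀ v, (l.foldl (pvStepA n f) (PySem.Dict.empty, (0:Int))).1.getD v 0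
        = (pvG n ((l.foldl (pvStepG f) PySem.Dict.empty).getD v [])).2) ∧
    (l.foldl (pvStepA n f) (PySem.Dict.empty, (0:Int))).2
      = ((l.foldl (pvStepG f) PySem.Dict.empty).keys.map
          (fun k => (pvG n ((l.foldl (pvStepG f) PySem.Dict.empty).getD k [])).1)).sum := by
  induction l using List.reverseRecOn with
  | nil =>
    refine ⟨by simp, fun v => by simp, fun v => by simp [pvG], by simp⟩
  | append_singleton l i ih =>
    obtain ⟨hnd, hc, hg, hans⟩ := ih
    set g := l.foldl (pvStepG f) PySem.Dict.empty with hgdef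
    set A := l.foldl (pvStepA n f) (PySem.Dict.empty, (0:Int)) with hAdef
    have hfoldG : (l ++ [i]).foldl (pvStepG f) PySem.Dict.empty = pvStepG f g i := by
      rw [List.foldl_append]; rfl
    have hfoldA : (l ++ [i]).foldl (pvStepA n f) (PySem.Dict.empty, (0:Int)) = pvStepA n f A i := by
      rw [List.foldl_append]; rfl
    rw [hfoldG, hfoldA]
    set x := f i with hxdef
    have hgetD' : ∀ v, (pvStepG f g i).getD v [] = if v = x then g.getD x [] ++ [i] else g.getD v [] := by
      intro v
      simp [pvStepG, PySem.Dict.getD_modify]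
      rw [hxdef]
    have hcont' : ∀ v, (pvStepG f g i).contains v = (v == x || g.contains v) := by
      intro v; simp [pvStepG, PySem.Dict.contains_modify]; rw [hxdef]
    have hkeys' : (pvStepG f g i).keys = (g.insert x ((g.getD x []) ++ [i])).keys := by
      simp [pvStepG, PySem.Dict.keys_modify]
      rw [hxdef]
    by_cases hx : g.contains x = true
    · -- existing value: A adds prefix * (n - i); g appends i to x's group
      have hAx : A.1.contains x = true := by rw [hc x]; exact hx
      have hA' : pvStepA n f A i
          = (A.1.insert x (A.1.getD x 0 + (i + 1)), A.2 + A.1.getD x 0 * (n - i)) := by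
        simp [pvStepA, ← hxdef, hAx]
      have hkeys : (pvStepG f g i).keys = g.keys := by
        rw [hkeys', PySem.Dict.keys_insert_of_contains _ _ hx]
      have hxmem : x ∈ g.keys := (PySem.Dict.contains_iff_mem_keys _ _).mp hx
      refine ⟨by rw [hkeys]; exact hnd, ?_, ?_, ?_⟩
      · intro v
        rw [hA', hcont']
        simp only [PySem.Dict.contains_insert, hc v]
      · intro v
        rw [hA', hgetD' v]
        by_cases hv : v = x
        · subst hv
          rw [PySem.Dict.getD_insert]
          simp [hg x, pvG_append]
          ring
        · rw [PySem.Dict.getD_insert]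
          simp [hv, hg v]
      · rw [hA', hkeys]
        have := pv_sum_map_update g.keys
          (fun k => (pvG n (g.getD k [])).1)
          (fun k => (pvG n ((pvStepG f g i).getD k [])).1) x hnd
          (fun k _ hk => by simp only [hgetD']; rw [if_neg hk])
        simp only [this, hxmem, if_pos]
        rw [← hans, hgetD' x, if_pos rfl, pvG_append, hg x]
        ring
    · -- new value: A inserts 0 then adds i+1; g starts the group [i]
      have hx' : g.contains x = false := by simpa using hx
      have hAx : A.1.contains x = false := by rw [hc x]; exact hx'
      have hA' : pvStepA n f A i = ((A.1.insert x 0).insert x ((A.1.insert x 0).getD x 0 + (i + 1)), A.2) := by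
        simp [pvStepA, ← hxdef, hAx]
      have hgx : g.getD x [] = [] := PySem.Dict.getD_of_not_contains _ _ hx'
      have hxmem : x ∉ g.keys := fun h => by
        rw [(PySem.Dict.contains_iff_mem_keys _ _).mpr h] at hx'; exact absurd hx' (by simp)
      have hkeys : (pvStepG f g i).keys = g.keys ++ [x] := by
        rw [hkeys', PySem.Dict.keys_insert_of_not_contains _ _ hx']
      refine ⟨?_, ?_, ?_, ?_⟩
      · rw [hkeys]
        exact List.Nodup.append hnd (List.nodup_singleton x) (by simpa using hxmem)
      · intro v
        rw [hA', hcont']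
        simp only [PySem.Dict.contains_insert, hc v]
        by_cases hv : v = x <;> simp [hv]
      · intro v
        rw [hA', hgetD' v]
        by_cases hv : v = x
        · subst hv
          rw [PySem.Dict.getD_insert, if_pos rfl, PySem.Dict.getD_insert, if_pos rfl, hgx]
          simp [pvG, pvStep]
        · rw [PySem.Dict.getD_insert, if_neg hv, PySem.Dict.getD_insert, if_neg hv, if_neg hv]
          exact hg v
      · rw [hA', hkeys]
        rw [List.map_append, List.sum_append]
        have hrest : (g.keys.map (fun k => (pvG n ((pvStepG f g i).getD k [])).1)).sum
            = (g.keys.map (fun k => (pvG n (g.getD k [])).1)).sum := by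
          apply congrArg
          apply List.map_congr_left
          intro k hk
          simp only [hgetD']
          rw [if_neg (by rintro rfl; exact hxmem hk)]
        rw [hrest, ← hans]
        rw [List.map_singleton, List.sum_singleton, hgetD' x, if_pos rfl, hgx]
        simp [pvG, pvStep]

-- ===== VERDICT (by name: the statement is the Claim_ definition above) =====
theorem solve_sequence_pair_weight_spec : Claim_equal_solve_sequence_pair_weight := by
  intro n arr _ _
  unfold Spec_solve_sequence_pair_weight
  set f : Int → Int := fun i => (PySem.List.pyGet? arr i).getD 0 with hf
  set l : List Int := PySem.List.pyRange 0 n 1 with hl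
  obtain ⟨hnd, _, _, hans⟩ := pv_main n f l
  have hA : solve_sequence_pair_weight n arr = (l.foldl (pvStepA n f) (PySem.Dict.empty, (0:Int))).2 := rfl
  set g := l.foldl (pvStepG f) PySem.Dict.empty with hg
  have hB : solve_sequence_pair_weight_alt n arr
      = g.values.foldl (fun ans L => (L.foldl (pvStep n) (ans, 0)).1) 0 := rfl
  rw [hA, hB, hans, pv_evalList, PySem.Dict.values_eq_map_keys g hnd ([] : List Int), List.map_map]
  simp only [Function.comp_def]
  ring
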